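-- pv_equiv track=rewrite | github.com/denakifev/vqa-gnn-impl | scripts/prepare_gqa_ner_data.py | _find_phrase_spans
-- ===== SOURCE A (Python) =====
-- def _find_phrase_spans(tokens: list[str], phrase: str) -> list[tuple[int, int]]:
--     phrase_tokens = phrase.split()
--     if not phrase_tokens or len(phrase_tokens) > len(tokens):
--         return []
--
--     spans: list[tuple[int, int]] = []
--     width = len(phrase_tokens)
--     for start in range(len(tokens) - width + 1):
--         if tokens[start : start + width] == phrase_tokens:
--             spans.append((start, start + width))
--     return spans
-- ===== SOURCE B (Python) =====
-- def _find_phrase_spans(tokens: list[str], phrase: str) -> list[tuple[int, int]]: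
--     # Rabin-Karp over the token sequence: prefix polynomial hashes give each
--     # window's hash in O(1); the full slice is compared only on a hash hit.
--     phrase_tokens = phrase.split()
--     if not phrase_tokens or len(phrase_tokens) > len(tokens):
--         return []
--
--     MOD = 1000000007
--     BASE = 1000003
--
--     def token_hash(s: str) -> int:
--         h = 0
--         for c in s:
--             h = (h * 131 + ord(c)) % MOD
--         return h
--
--     n = len(tokens)
--     m = len(phrase_tokens)
--     hv = [token_hash(t) for t in tokens]
--     pv = [token_hash(t) for t in phrase_tokens]
--
--     pref = [0]
--     h = 0
--     for x in hv:
--         h = (h * BASE + x) % MOD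
--         pref.append(h)
--
--     ph = 0
--     for x in pv:
--         ph = (ph * BASE + x) % MOD
--
--     pw = pow(BASE, m, MOD)
--
--     spans: list[tuple[int, int]] = []
--     for i in range(n - m + 1):
--         if (pref[i + m] - pref[i] * pw) % MOD == ph and tokens[i:i + m] == phrase_tokens:
--             spans.append((i, i + m))
--     return spans
-- ===== Notes on version B (the rewrite author's own statement) =====
-- stated objective: alternative
-- what changed: Replaced the per-start O(m) slice comparison at every position with Rabin-Karp prefix polynomial hashing: window hashes are derived in O(1) from precomputed prefix hashes and the slice is compared only on a hash hit.
import Mathlib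
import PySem

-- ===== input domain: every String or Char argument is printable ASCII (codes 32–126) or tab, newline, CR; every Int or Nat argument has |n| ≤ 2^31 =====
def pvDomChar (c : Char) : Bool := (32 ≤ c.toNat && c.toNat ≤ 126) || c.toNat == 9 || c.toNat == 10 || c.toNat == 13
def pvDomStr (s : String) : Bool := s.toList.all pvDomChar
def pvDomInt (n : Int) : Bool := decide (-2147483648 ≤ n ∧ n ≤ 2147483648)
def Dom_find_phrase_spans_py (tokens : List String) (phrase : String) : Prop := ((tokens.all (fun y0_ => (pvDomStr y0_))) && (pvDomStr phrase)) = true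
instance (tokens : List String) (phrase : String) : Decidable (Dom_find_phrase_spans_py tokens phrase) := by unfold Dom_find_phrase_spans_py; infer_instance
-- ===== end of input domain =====

-- B replaces the per-start slice comparison with Rabin–Karp prefix polynomial hashing
-- (windows compared by hash, the slice re-checked only on a hash hit): a different
-- algorithm of similar size ("alternative"; no wall-clock speed is claimed).

-- ===== PORT A =====
def find_phrase_spans_py (tokens : List String) (phrase : String) : List (Int × Int) :=
  let phrase_tokens := PySem.Str.split₀ phrase
  if phrase_tokens = [] ∨ tokens.length < phrase_tokens.length then []
  else
    let width := phrase_tokens.length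
    (PySem.List.pyRange 0 ((tokens.length : Int) - (width : Int) + 1) 1).foldl
      (fun spans start =>
        if PySem.List.slice tokens (some start) (some (start + (width : Int))) = phrase_tokens
        then spans ++ [(start, start + (width : Int))] else spans) []

-- ===== PORT B =====
def pvM : Int := 1000000007
def pvB : Int := 1000003

-- token_hash from Source B: fold over the characters, reducing mod pvM at each step
def pvTokenHash (s : String) : Int :=
  s.toList.foldl (fun h c => PySem.Int.mod (h * 131 + (c.toNat : Int)) pvM) 0

def find_phrase_spans_py_alt (tokens : List String) (phrase : String) : List (Int × Int) :=
  let phrase_tokens := PySem.Str.split₀ phrase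
  if phrase_tokens = [] ∨ tokens.length < phrase_tokens.length then []
  else
    let n := tokens.length
    let m := phrase_tokens.length
    let hv := tokens.map pvTokenHash
    let pv := phrase_tokens.map pvTokenHash
    let pref := (hv.foldl (fun (st : Int × List Int) x =>
        let h := PySem.Int.mod (st.1 * pvB + x) pvM
        (h, st.2 ++ [h])) (0, ([0] : List Int))).2
    let ph := pv.foldl (fun h x => PySem.Int.mod (h * pvB + x) pvM) 0
    let pw := PySem.Int.powMod pvB m pvM
    (PySem.List.pyRange 0 ((n : Int) - (m : Int) + 1) 1).foldl
      (fun spans i =>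
        if PySem.Int.mod (PySem.List.pyGetD pref (i + (m : Int)) 0
              - PySem.List.pyGetD pref i 0 * pw) pvM = ph
           ∧ PySem.List.slice tokens (some i) (some (i + (m : Int))) = phrase_tokens
        then spans ++ [(i, i + (m : Int))] else spans) []

-- ===== PRECONDITION & SPEC =====
def Spec_find_phrase_spans_py (tokens : List String) (phrase : String) (out : List (Int × Int)) : Prop := out = find_phrase_spans_py_alt tokens phrase
instance (tokens : List String) (phrase : String) (out : List (Int × Int)) : Decidable (Spec_find_phrase_spans_py tokens phrase out) := by unfold Spec_find_phrase_spans_py; infer_instance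

-- ===== CLAIM (what is proved, stated in full; the proofs are below) =====
def Claim_equal_find_phrase_spans_py : Prop := ∀ (tokens : List String) (phrase : String), Dom_find_phrase_spans_py tokens phrase → Spec_find_phrase_spans_py tokens phrase (find_phrase_spans_py tokens phrase)

-- ===== LEMMAS AND PROOFS =====

def pvStep0 (h x : Int) : Int := h * pvB + x
def pvStep (h x : Int) : Int := (h * pvB + x) % pvM

def pvPrefList (h : Int) : List Int → List Int
  | [] => []
  | x :: xs => pvStep h x :: pvPrefList (pvStep h x) xs

theorem pvmod (a : Int) : PySem.Int.mod a pvM = a % pvM :=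
  PySem.Int.mod_eq_emod_of_pos (by norm_num [pvM])

theorem pvStep_eq : (fun h x => PySem.Int.mod (h * pvB + x) pvM) = pvStep := by
  funext h x; simp [pvStep, pvmod]

theorem pv_fold_snd (xs : List Int) (h : Int) (l : List Int) :
    (xs.foldl (fun (st : Int × List Int) x =>
        let h' := PySem.Int.mod (st.1 * pvB + x) pvM
        (h', st.2 ++ [h'])) (h, l)).2 = l ++ pvPrefList h xs := by
  induction xs generalizing h l with
  | nil => simp [pvPrefList]
  | cons x xs ih =>
    simp only [List.foldl_cons]
    rw [ih]
    simp [pvPrefList, pvStep, pvmod]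

theorem pv_getD_pref (xs : List Int) (h : Int) (j : Nat) (hj : j ≤ xs.length) :
    (h :: pvPrefList h xs).getD j 0 = (xs.take j).foldl pvStep h := by
  induction xs generalizing h j with
  | nil => simp [pvPrefList, Nat.le_zero.mp hj]
  | cons x xs ih =>
    cases j with
    | zero => simp
    | succ j =>
      simp only [pvPrefList, List.getD_cons_succ, List.take_succ_cons, List.foldl_cons]
      exact ih (pvStep h x) j (by simpa using hj)

theorem pv_fold0_shift (ys : List Int) (h : Int) :
    ys.foldl pvStep0 h = h * pvB ^ ys.length + ys.foldl pvStep0 0 := by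
  induction ys generalizing h with
  | nil => simp
  | cons y ys ih =>
    simp only [List.foldl_cons, List.length_cons]
    rw [ih (pvStep0 h y), ih (pvStep0 0 y)]
    simp [pvStep0, pow_succ]; ring

theorem pv_modshift (a b c : Int) :
    ((a % pvM) * b + c) % pvM = (a * b + c) % pvM := by
  conv_lhs => rw [Int.add_emod, Int.mul_emod, Int.emod_emod_of_dvd _ dvd_rfl,
    ← Int.mul_emod, ← Int.add_emod]

theorem pv_foldm (ys : List Int) (h : Int) (hne : ys ≠ []) :
    ys.foldl pvStep h = (h * pvB ^ ys.length + ys.foldl pvStep0 0) % pvM := by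
  induction ys generalizing h with
  | nil => exact absurd rfl hne
  | cons y ys ih =>
    by_cases hys : ys = []
    · subst hys
      simp only [List.foldl_cons, List.foldl_nil, List.length_cons, List.length_nil]
      have : h * pvB ^ (0 + 1) + pvStep0 0 y = h * pvB + y := by simp [pvStep0]
      rw [this]; rfl
    · simp only [List.foldl_cons, List.length_cons]
      rw [ih (pvStep h y) hys]
      have h1 : pvStep h y = (h * pvB + y) % pvM := rfl
      rw [h1, pv_modshift, pv_fold0_shift ys (pvStep0 0 y)]
      congr 1
      simp [pvStep0, pow_succ]; ring

theorem pv_key (X c : Int) (e : Nat) :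
    ((X * pvB ^ e + c) % pvM - X * (pvB ^ e % pvM)) % pvM = c % pvM := by
  rw [Int.sub_emod, Int.emod_emod_of_dvd _ dvd_rfl, Int.mul_emod X (pvB ^ e % pvM),
    Int.emod_emod_of_dvd _ dvd_rfl, ← Int.mul_emod, ← Int.sub_emod]
  have : X * pvB ^ e + c - X * pvB ^ e = c := by ring
  rw [this]

-- on a hash hit forced by an actual match, B's hash condition holds
theorem pv_hash_hit (tokens pt : List String) (k : Nat)
    (hne : pt ≠ []) (hkm : k + pt.length ≤ tokens.length)
    (hs : PySem.List.slice tokens (some (k : Int)) (some ((k : Int) + (pt.length : Int))) = pt) :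
    PySem.Int.mod
        (PySem.List.pyGetD (0 :: pvPrefList 0 (tokens.map pvTokenHash)) ((k : Int) + (pt.length : Int)) 0
          - PySem.List.pyGetD (0 :: pvPrefList 0 (tokens.map pvTokenHash)) (k : Int) 0
            * PySem.Int.powMod pvB pt.length pvM) pvM
      = (pt.map pvTokenHash).foldl pvStep 0 := by
  set hv := tokens.map pvTokenHash with hhv
  have hlen : hv.length = tokens.length := by simp [hhv]
  have hm0 : 0 < pt.length := List.length_pos_iff.mpr hne
  have hcast : (k : Int) + (pt.length : Int) = ((k + pt.length : Nat) : Int) := by push_cast; ring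
  rw [hcast, PySem.List.pyGetD_natCast, PySem.List.pyGetD_natCast,
    pv_getD_pref hv 0 (k + pt.length) (by omega),
    pv_getD_pref hv 0 k (by omega)]
  have hslice : (tokens.drop k).take pt.length = pt := by
    rwa [PySem.List.slice_natCast_add] at hs
  have hw : (hv.drop k).take pt.length = pt.map pvTokenHash := by
    rw [hhv, ← List.map_drop, ← List.map_take, hslice]
  have htake : hv.take (k + pt.length) = hv.take k ++ (hv.drop k).take pt.length :=
    List.take_add ..
  have hpvne : pt.map pvTokenHash ≠ [] := by simp [hne]
  rw [htake, List.foldl_append, hw,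
    pv_foldm (pt.map pvTokenHash) _ hpvne, pv_foldm (pt.map pvTokenHash) 0 hpvne]
  have hpw : PySem.Int.powMod pvB pt.length pvM = pvB ^ pt.length % pvM := by
    simp [PySem.Int.powMod, pvmod]
  rw [hpw, pvmod, List.length_map, pv_key]
  congr 1
  ring

-- ===== VERDICT (by name: the statement is the Claim_ definition above) =====
theorem find_phrase_spans_py_spec : Claim_equal_find_phrase_spans_py := by
  intro tokens phrase _
  unfold Spec_find_phrase_spans_py
  simp only [find_phrase_spans_py, find_phrase_spans_py_alt]
  by_cases hg : PySem.Str.split₀ phrase = [] ∨ tokens.length < (PySem.Str.split₀ phrase).length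
  · simp [hg]
  · rw [if_neg hg, if_neg hg]
    rw [not_or, not_lt] at hg
    obtain ⟨hne, hlen⟩ := hg
    set pt := PySem.Str.split₀ phrase with hpt
    rw [pv_fold_snd, pvStep_eq]
    simp only [List.singleton_append]
    apply PySem.List.foldl_congr_mem
    intro acc i hi
    rw [PySem.List.mem_pyRange_one] at hi
    obtain ⟨hi0, hi1⟩ := hi
    obtain ⟨k, rfl⟩ : ∃ k : Nat, i = (k : Int) := ⟨i.toNat, (Int.toNat_of_nonneg hi0).symm⟩
    have hkm : k + pt.length ≤ tokens.length := by omega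
    by_cases hs : PySem.List.slice tokens (some (k : Int)) (some ((k : Int) + (pt.length : Int))) = pt
    · rw [if_pos hs, if_pos ⟨pv_hash_hit tokens pt k hne hkm hs, hs⟩]
    · rw [if_neg hs, if_neg (fun h => hs h.2)]
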